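-- pv_equiv track=rewrite | github.com/Olamzkid2005/Argus- | argus-platform/tasks/repo_scan.py | _extract_file_path
-- ===== SOURCE A (Python) =====
-- from typing import List, Dict, Set
--
-- def _extract_file_path(lines: List[str], line_num: int) -> str:
--     """Extract file path from diff lines given a 1-based line number."""
--     file_path = "unknown"
--     for i in range(line_num - 1, -1, -1):
--         line = lines[i]
--         if line.startswith("+++ b/"):
--             file_path = line[6:].strip()
--             break
--         elif line.startswith("--- a/"):
--             file_path = line[6:].strip()
--             break
--     return file_path
-- ===== SOURCE B (Python) =====
-- def _extract_file_path(lines, line_num):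
--     """Extract file path from diff lines given a 1-based line number."""
--     file_path = "unknown"
--     for i in range(line_num):
--         line = lines[i]
--         if line.startswith("+++ b/") or line.startswith("--- a/"):
--             file_path = line[6:].strip()
--     return file_path
-- ===== Notes on version B (the rewrite author's own statement) =====
-- stated objective: alternative
-- what changed: Backward scan with early break replaced by a forward single pass that keeps the last header seen, folding the two prefix branches into one assignment.
import Mathlib
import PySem

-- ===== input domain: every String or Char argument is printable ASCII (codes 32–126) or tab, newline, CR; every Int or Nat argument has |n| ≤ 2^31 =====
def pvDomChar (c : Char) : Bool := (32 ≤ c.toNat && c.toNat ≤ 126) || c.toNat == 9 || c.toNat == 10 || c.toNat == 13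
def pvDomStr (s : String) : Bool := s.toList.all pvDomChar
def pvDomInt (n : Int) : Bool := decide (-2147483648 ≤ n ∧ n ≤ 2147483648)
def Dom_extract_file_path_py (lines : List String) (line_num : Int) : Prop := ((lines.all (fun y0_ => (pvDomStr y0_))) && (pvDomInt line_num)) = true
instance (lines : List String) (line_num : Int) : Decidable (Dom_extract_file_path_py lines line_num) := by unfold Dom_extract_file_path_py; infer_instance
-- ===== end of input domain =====

-- B replaces A's backward scan with early break by a forward single pass keeping the
-- last header seen; objective: alternative decomposition. Equal return value on Pre_.

-- ===== PORT A =====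
-- backward loop 'for i in range(line_num-1, -1, -1)' with break = structural recursion
-- on the countdown index list; 'lines[i]' = pyGet? (none = IndexError, excluded by Pre_).
def pvGoA (lines : List String) : List Int → String
  | [] => "unknown"
  | i :: rest =>
    match PySem.List.pyGet? lines i with
    | none => "unknown"   -- IndexError in Python; unreachable under Pre_
    | some line =>
      if PySem.Str.startswith line "+++ b/" then
        PySem.Str.strip (PySem.Str.slice line (some 6) none)
      else if PySem.Str.startswith line "--- a/" then
        PySem.Str.strip (PySem.Str.slice line (some 6) none)
      else pvGoA lines rest

def extract_file_path_py (lines : List String) (line_num : Int) : String :=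
  pvGoA lines (PySem.List.pyRange (line_num - 1) (-1) (-1))

-- ===== PORT B =====
-- forward loop 'for i in range(line_num)' without break: a left fold updating file_path.
def pvStepB (lines : List String) (acc : String) (i : Int) : String :=
  match PySem.List.pyGet? lines i with
  | none => acc   -- IndexError in Python; unreachable under Pre_
  | some line =>
    if PySem.Str.startswith line "+++ b/" || PySem.Str.startswith line "--- a/" then
      PySem.Str.strip (PySem.Str.slice line (some 6) none)
    else acc

def extract_file_path_py_alt (lines : List String) (line_num : Int) : String :=
  (PySem.List.pyRange 0 line_num 1).foldl (pvStepB lines) "unknown"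

-- ===== PRECONDITION & SPEC =====
-- Pre_ excludes exactly the inputs where Python A raises IndexError: line_num > len(lines)
-- (with line_num ≥ 1 the loop reads lines[line_num-1] first); B raises there too.
def Pre_extract_file_path_py (lines : List String) (line_num : Int) : Prop :=
  line_num ≤ (lines.length : Int)
instance (lines : List String) (line_num : Int) : Decidable (Pre_extract_file_path_py lines line_num) := by unfold Pre_extract_file_path_py; infer_instance

def pvWitness_extract_file_path_py : List String × Int := (["+++ b/foo.py", " ctx"], 2)

def Spec_extract_file_path_py (lines : List String) (line_num : Int) (out : String) : Prop := out = extract_file_path_py_alt lines line_num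
instance (lines : List String) (line_num : Int) (out : String) : Decidable (Spec_extract_file_path_py lines line_num out) := by unfold Spec_extract_file_path_py; infer_instance

-- ===== CLAIM (what is proved, stated in full; the proofs are below) =====
def Claim_equal_extract_file_path_py : Prop := ∀ (lines : List String) (line_num : Int), Dom_extract_file_path_py lines line_num → Pre_extract_file_path_py lines line_num → Spec_extract_file_path_py lines line_num (extract_file_path_py lines line_num)

-- ===== LEMMAS AND PROOFS =====

-- the value a header line contributes, if any
def pvHit (lines : List String) (i : Int) : Option String :=
  (PySem.List.pyGet? lines i).bind (fun line =>
    if PySem.Str.startswith line "+++ b/" || PySem.Str.startswith line "--- a/" then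
      some (PySem.Str.strip (PySem.Str.slice line (some 6) none))
    else none)

theorem pvGoA_eq_findSome (lines : List String) (l : List Int)
    (h : ∀ i ∈ l, (PySem.List.pyGet? lines i).isSome) :
    pvGoA lines l = (l.findSome? (pvHit lines)).getD "unknown" := by
  induction l with
  | nil => rfl
  | cons a l ih =>
    have ha := h a (by simp)
    obtain ⟨line, hline⟩ := Option.isSome_iff_exists.mp ha
    have hrest : ∀ i ∈ l, (PySem.List.pyGet? lines i).isSome :=
      fun i hi => h i (by simp [hi])
    simp only [pvGoA, List.findSome?_cons, pvHit, hline, Option.bind_some]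
    cases h1 : PySem.Chars.startswith line.toList ['+', '+', '+', ' ', 'b', '/'] <;>
      cases h2 : PySem.Chars.startswith line.toList ['-', '-', '-', ' ', 'a', '/'] <;>
        simp [h1, h2, ih hrest]

theorem pvStepB_eq (lines : List String) (acc : String) (i : Int)
    (h : (PySem.List.pyGet? lines i).isSome) :
    pvStepB lines acc i = (pvHit lines i).getD acc := by
  obtain ⟨line, hline⟩ := Option.isSome_iff_exists.mp h
  simp only [pvStepB, pvHit, hline, Option.bind_some]
  cases h1 : PySem.Chars.startswith line.toList ['+', '+', '+', ' ', 'b', '/'] <;>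
    cases h2 : PySem.Chars.startswith line.toList ['-', '-', '-', ' ', 'a', '/'] <;>
      simp [h1, h2]

theorem pvFoldB_eq_findSome (lines : List String) (l : List Int) (acc : String)
    (h : ∀ i ∈ l, (PySem.List.pyGet? lines i).isSome) :
    l.foldl (pvStepB lines) acc = (l.reverse.findSome? (pvHit lines)).getD acc := by
  induction l generalizing acc with
  | nil => rfl
  | cons a l ih =>
    simp only [List.foldl_cons, List.reverse_cons, List.findSome?_append]
    rw [ih (pvStepB lines acc a) (fun i hi => h i (by simp [hi]))]
    cases hfs : l.reverse.findSome? (pvHit lines) with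
    | some v => simp
    | none =>
      simp only [Option.getD_none, List.findSome?_cons, List.findSome?_nil]
      rw [pvStepB_eq lines acc a (h a (by simp))]
      cases pvHit lines a <;> simp

-- ===== VERDICT (by name: the statement is the Claim_ definition above) =====
theorem extract_file_path_py_spec : Claim_equal_extract_file_path_py := by
  intro lines line_num _hdom hpre
  unfold Pre_extract_file_path_py at hpre
  unfold Spec_extract_file_path_py extract_file_path_py extract_file_path_py_alt
  have hsome : ∀ i ∈ PySem.List.pyRange 0 line_num 1,
      (PySem.List.pyGet? lines i).isSome := by
    intro i hi
    rw [PySem.List.mem_pyRange_one] at hi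
    rw [PySem.List.pyGet?_eq_some_getElem lines hi.1 (by omega)]
    rfl
  have hrev : PySem.List.pyRange (line_num - 1) (-1) (-1)
      = (PySem.List.pyRange 0 line_num 1).reverse := by
    rw [PySem.List.pyRange_neg_one_eq_reverse]
    norm_num
  rw [hrev, pvGoA_eq_findSome lines _ (by intro i hi; exact hsome i (List.mem_reverse.mp hi)),
      pvFoldB_eq_findSome lines _ _ hsome]
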